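-- pv_equiv track=rewrite | github.com/uleso26/DEIA-26 | agents/knowledge_graph_agent.py | _select_context_drug
-- ===== SOURCE A (Python) =====
-- def _select_context_drug(
--
--     drugbank_records: list[dict[str, str]],
--     next_steps: list[str],
--     start_drug: str,
-- ) -> dict[str, str]:
--     next_step_terms = {term.lower() for term in next_steps if term}
--     start_drug_lower = start_drug.lower()
--     for record in drugbank_records:
--         canonical_drug = record.get("canonical_drug", "").lower()
--         drug_class = record.get("drug_class", "").lower()
--         if canonical_drug in next_step_terms or drug_class in next_step_terms:
--             return record
--     for record in drugbank_records:
--         if record.get("canonical_drug", "").lower() != start_drug_lower: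
--             return record
--     return drugbank_records[0]
-- ===== SOURCE B (Python) =====
-- def _select_context_drug(
--     drugbank_records: list[dict[str, str]],
--     next_steps: list[str],
--     start_drug: str,
-- ) -> dict[str, str]:
--     next_step_terms = {term.lower() for term in next_steps if term}
--     start_drug_lower = start_drug.lower()
--     fallback = None
--     for record in drugbank_records:
--         canonical_drug = record.get("canonical_drug", "").lower()
--         if canonical_drug in next_step_terms or record.get("drug_class", "").lower() in next_step_terms:
--             return record
--         if fallback is None and canonical_drug != start_drug_lower:
--             fallback = record
--     if fallback is not None:
--         return fallback
--     return drugbank_records[0]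
-- ===== Notes on version B (the rewrite author's own statement) =====
-- stated objective: alternative
-- what changed: Replaced A's two sequential scans (first matching record, then first non-start record) by a single scan that returns on a term match and remembers the first non-start record as a fallback.
import Mathlib
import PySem

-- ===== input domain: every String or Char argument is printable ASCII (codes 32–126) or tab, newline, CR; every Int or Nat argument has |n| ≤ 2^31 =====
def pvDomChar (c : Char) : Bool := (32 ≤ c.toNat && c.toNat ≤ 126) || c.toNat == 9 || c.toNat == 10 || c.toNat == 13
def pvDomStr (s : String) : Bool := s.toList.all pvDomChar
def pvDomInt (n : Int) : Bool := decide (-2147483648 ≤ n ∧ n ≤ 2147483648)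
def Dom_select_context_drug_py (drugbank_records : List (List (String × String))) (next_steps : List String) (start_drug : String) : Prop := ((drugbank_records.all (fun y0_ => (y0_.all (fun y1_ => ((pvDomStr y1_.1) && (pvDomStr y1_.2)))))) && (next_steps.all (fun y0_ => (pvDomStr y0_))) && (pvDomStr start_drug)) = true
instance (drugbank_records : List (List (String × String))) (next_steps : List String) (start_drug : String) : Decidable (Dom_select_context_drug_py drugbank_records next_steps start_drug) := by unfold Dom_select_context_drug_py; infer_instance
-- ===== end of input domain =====

-- B replaces A's two sequential scans by one scan that remembers the first non-start record
-- as a fallback (alternative decomposition, same return value on nonempty input).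


-- record.get(k, d): first-match lookup in the association list (dict in insertion order)
def pvRecGetD (r : List (String × String)) (k d : String) : String :=
  match r.find? (fun p => p.1 == k) with
  | some p => p.2
  | none => d

-- ===== PORT A =====
-- second loop: first record whose canonical_drug (lowered) differs from start_drug_lower,
-- else drugbank_records[0] ([] only where Python raises IndexError, excluded by Pre_)
def pvALoop2 (orig : List (List (String × String))) (rs : List (List (String × String)))
    (startL : String) : List (String × String) :=
  match rs with
  | [] =>
    match orig with
    | [] => []          -- drugbank_records[0] raises here; outside Pre_
    | r :: _ => r
  | r :: rest =>
    if PySem.Str.lower (pvRecGetD r "canonical_drug" "") != startL then r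
    else pvALoop2 orig rest startL

-- first loop: first record matching a next-step term, else fall through to the second loop
def pvALoop1 (orig : List (List (String × String))) (rs : List (List (String × String)))
    (terms : PySem.Set String) (startL : String) : List (String × String) :=
  match rs with
  | [] => pvALoop2 orig orig startL
  | r :: rest =>
    let canonical_drug := PySem.Str.lower (pvRecGetD r "canonical_drug" "")
    let drug_class := PySem.Str.lower (pvRecGetD r "drug_class" "")
    if terms.contains canonical_drug || terms.contains drug_class then r
    else pvALoop1 orig rest terms startL

def select_context_drug_py (drugbank_records : List (List (String × String))) (next_steps : List String) (start_drug : String) : List (String × String) :=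
  let terms : PySem.Set String :=
    PySem.Set.ofList ((next_steps.filter (fun t => t != "")).map PySem.Str.lower)
  let startL := PySem.Str.lower start_drug
  pvALoop1 drugbank_records drugbank_records terms startL

-- ===== PORT B =====
-- single scan: return on a term match; remember the first non-start record as fallback
def pvBLoop (orig : List (List (String × String))) (rs : List (List (String × String)))
    (fb : Option (List (String × String))) (terms : PySem.Set String) (startL : String) :
    List (String × String) :=
  match rs with
  | [] =>
    match fb with
    | some f => f
    | none =>
      match orig with
      | [] => []        -- drugbank_records[0] raises here; outside Pre_
      | r :: _ => r
  | r :: rest =>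
    let canonical_drug := PySem.Str.lower (pvRecGetD r "canonical_drug" "")
    if terms.contains canonical_drug
        || terms.contains (PySem.Str.lower (pvRecGetD r "drug_class" "")) then r
    else
      pvBLoop orig rest
        (if fb.isNone && canonical_drug != startL then some r else fb) terms startL

def select_context_drug_py_alt (drugbank_records : List (List (String × String))) (next_steps : List String) (start_drug : String) : List (String × String) :=
  let terms : PySem.Set String :=
    PySem.Set.ofList ((next_steps.filter (fun t => t != "")).map PySem.Str.lower)
  let startL := PySem.Str.lower start_drug
  pvBLoop drugbank_records drugbank_records none terms startL

-- ===== PRECONDITION & SPEC =====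
-- Pre_ excludes only the empty record list, on which A raises IndexError at drugbank_records[0].
def Pre_select_context_drug_py (drugbank_records : List (List (String × String))) (next_steps : List String) (start_drug : String) : Prop :=
  drugbank_records ≠ []
instance (drugbank_records : List (List (String × String))) (next_steps : List String) (start_drug : String) : Decidable (Pre_select_context_drug_py drugbank_records next_steps start_drug) := by unfold Pre_select_context_drug_py; infer_instance

def pvWitness_select_context_drug_py : (List (List (String × String))) × List String × String :=
  ([[("canonical_drug", "Aspirin")]], ["aspirin"], "ibuprofen")

def Spec_select_context_drug_py (drugbank_records : List (List (String × String))) (next_steps : List String) (start_drug : String) (out : List (String × String)) : Prop := out = select_context_drug_py_alt drugbank_records next_steps start_drug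
instance (drugbank_records : List (List (String × String))) (next_steps : List String) (start_drug : String) (out : List (String × String)) : Decidable (Spec_select_context_drug_py drugbank_records next_steps start_drug out) := by unfold Spec_select_context_drug_py; infer_instance

-- ===== CLAIM (what is proved, stated in full; the proofs are below) =====
def Claim_equal_select_context_drug_py : Prop := ∀ (drugbank_records : List (List (String × String))) (next_steps : List String) (start_drug : String), Dom_select_context_drug_py drugbank_records next_steps start_drug → Pre_select_context_drug_py drugbank_records next_steps start_drug → Spec_select_context_drug_py drugbank_records next_steps start_drug (select_context_drug_py drugbank_records next_steps start_drug)

-- ===== LEMMAS AND PROOFS =====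

-- the match test both loops apply to a record
def pvMatches (terms : PySem.Set String) (r : List (String × String)) : Bool :=
  terms.contains (PySem.Str.lower (pvRecGetD r "canonical_drug" ""))
    || terms.contains (PySem.Str.lower (pvRecGetD r "drug_class" ""))

-- if no record of rs matches, B's loop returns the fallback if set, else A's second loop on rs
lemma pvBLoop_no_match (orig : List (List (String × String))) (terms : PySem.Set String)
    (startL : String) :
    ∀ (rs : List (List (String × String))) (fb : Option (List (String × String))),
      rs.all (fun r => !pvMatches terms r) →
      pvBLoop orig rs fb terms startL =
        match fb with
        | some f => f
        | none => pvALoop2 orig rs startL := by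
  intro rs
  induction rs with
  | nil =>
    intro fb _
    cases fb <;> simp [pvBLoop, pvALoop2]
  | cons r rest ih =>
    intro fb hall
    simp only [List.all_cons, Bool.and_eq_true, Bool.not_eq_true'] at hall
    obtain ⟨hr, hrest⟩ := hall
    have hr' : (terms.contains (PySem.Str.lower (pvRecGetD r "canonical_drug" ""))
        || terms.contains (PySem.Str.lower (pvRecGetD r "drug_class" ""))) = false := hr
    cases fb with
    | some f =>
      simp only [pvBLoop, hr', Bool.false_eq_true, if_false, Option.isNone_some,
        Bool.false_and]
      exact ih (some f) hrest
    | none =>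
      simp only [pvBLoop, hr', Bool.false_eq_true, if_false, Option.isNone_none,
        Bool.true_and]
      by_cases hc : (PySem.Str.lower (pvRecGetD r "canonical_drug" "") != startL) = true
      · rw [if_pos hc, ih (some r) hrest]
        simp [pvALoop2, hc]
      · rw [if_neg hc, ih none hrest]
        simp only [Bool.not_eq_true] at hc
        simp [pvALoop2, hc]

-- if some record of rs matches, B's loop ignores the fallback and agrees with A's first loop
lemma pvBLoop_match (orig : List (List (String × String))) (terms : PySem.Set String)
    (startL : String) :
    ∀ (rs : List (List (String × String))) (fb : Option (List (String × String))),
      rs.any (fun r => pvMatches terms r) →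
      pvBLoop orig rs fb terms startL = pvALoop1 orig rs terms startL := by
  intro rs
  induction rs with
  | nil => intro fb h; simp at h
  | cons r rest ih =>
    intro fb hany
    by_cases hr : pvMatches terms r = true
    · have hr' : (terms.contains (PySem.Str.lower (pvRecGetD r "canonical_drug" ""))
          || terms.contains (PySem.Str.lower (pvRecGetD r "drug_class" ""))) = true := hr
      simp only [pvBLoop, pvALoop1]
      rw [if_pos hr', if_pos hr']
    · have hr' : (terms.contains (PySem.Str.lower (pvRecGetD r "canonical_drug" ""))
          || terms.contains (PySem.Str.lower (pvRecGetD r "drug_class" ""))) = false := by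
        simpa [pvMatches] using hr
      have hrest : rest.any (fun r => pvMatches terms r) := by
        simp only [List.any_cons, Bool.or_eq_true] at hany
        rcases hany with h | h
        · exact absurd h hr
        · exact h
      simp only [pvBLoop, pvALoop1, hr', Bool.false_eq_true, if_false]
      rw [ih _ hrest]

-- if no record of rs matches, A's first loop falls through to the second loop on orig
lemma pvALoop1_no_match (orig : List (List (String × String))) (terms : PySem.Set String)
    (startL : String) :
    ∀ (rs : List (List (String × String))),
      rs.all (fun r => !pvMatches terms r) →
      pvALoop1 orig rs terms startL = pvALoop2 orig orig startL := by
  intro rs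
  induction rs with
  | nil => intro _; simp [pvALoop1]
  | cons r rest ih =>
    intro hall
    simp only [List.all_cons, Bool.and_eq_true, Bool.not_eq_true'] at hall
    obtain ⟨hr, hrest⟩ := hall
    have hr' : (terms.contains (PySem.Str.lower (pvRecGetD r "canonical_drug" ""))
        || terms.contains (PySem.Str.lower (pvRecGetD r "drug_class" ""))) = false := hr
    simp only [pvALoop1, hr', Bool.false_eq_true, if_false]
    exact ih hrest

-- ===== VERDICT (by name: the statement is the Claim_ definition above) =====
theorem select_context_drug_py_spec : Claim_equal_select_context_drug_py := by
  intro recs steps start _ _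
  unfold Spec_select_context_drug_py
  simp only [select_context_drug_py, select_context_drug_py_alt]
  by_cases h : recs.any (fun r => pvMatches
      (PySem.Set.ofList ((steps.filter (fun t => t != "")).map PySem.Str.lower)) r) = true
  · rw [pvBLoop_match _ _ _ _ _ h]
  · have hall : recs.all (fun r => !pvMatches
        (PySem.Set.ofList ((steps.filter (fun t => t != "")).map PySem.Str.lower)) r) := by
      simp only [Bool.not_eq_true, List.any_eq_false] at h
      simp only [List.all_eq_true, Bool.not_eq_true']
      exact fun r hm => h r hm
    rw [pvBLoop_no_match _ _ _ _ _ hall, pvALoop1_no_match _ _ _ _ hall]
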